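-- pv_equiv track=rewrite | github.com/cortexuvula/Medical-Assistant | src/core/document_export_controller.py | parse_soap_sections
-- ===== SOURCE A (Python) =====
-- from typing import TYPE_CHECKING, Dict, List, Tuple
--
-- def parse_soap_sections(content: str) -> Dict[str, str]:
--     """Parse SOAP note content into sections.
--
--     Args:
--         content: Raw SOAP note text
--
--     Returns:
--         Dictionary with subjective, objective, assessment, and plan sections
--     """
--     sections = {
--         'subjective': '',
--         'objective': '',
--         'assessment': '',
--         'plan': ''
--     }
--
--     # Simple parsing - look for section headers
--     lines = content.split('\n')
--     current_section = None
--     section_content = []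
--
--     section_headers = {
--         'subjective': ['subjective:', 's:'],
--         'objective': ['objective:', 'o:'],
--         'assessment': ['assessment:', 'a:'],
--         'plan': ['plan:', 'p:']
--     }
--
--     for line in lines:
--         line_lower = line.lower().strip()
--
--         # Check if this line is a section header
--         new_section = None
--         for section, headers in section_headers.items():
--             if any(line_lower.startswith(header) for header in headers):
--                 new_section = section
--                 break
--
--         if new_section:
--             # Save previous section content
--             if current_section and section_content:
--                 sections[current_section] = '\n'.join(section_content).strip()
--
--             # Start new section
--             current_section = new_section
--             section_content = []
--
--             # Add content after the header on the same line
--             header_text = line.split(':', 1)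
--             if len(header_text) > 1 and header_text[1].strip():
--                 section_content.append(header_text[1].strip())
--         elif current_section:
--             # Add line to current section
--             section_content.append(line)
--
--     # Save last section
--     if current_section and section_content:
--         sections[current_section] = '\n'.join(section_content).strip()
--
--     # If no sections found, put all content in subjective
--     if not any(sections.values()):
--         sections['subjective'] = content
--
--     return sections
-- ===== SOURCE B (Python) =====
-- SECTION_HEADERS = [
--     ('subjective', ['subjective:', 's:']),
--     ('objective', ['objective:', 'o:']),
--     ('assessment', ['assessment:', 'a:']),
--     ('plan', ['plan:', 'p:']),
-- ]
--
--
-- def _header_of(line):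
--     ll = line.lower().strip()
--     for name, prefixes in SECTION_HEADERS:
--         if any(ll.startswith(p) for p in prefixes):
--             return name
--     return None
--
--
-- def parse_soap_sections(content: str):
--     sections = {'subjective': '', 'objective': '', 'assessment': '', 'plan': ''}
--     lines = content.split('\n')
--     n = len(lines)
--     # skip prologue lines before the first header
--     i = 0
--     while i < n and _header_of(lines[i]) is None:
--         i += 1
--     # span-based grouping: each header owns the lines up to the next header
--     while i < n:
--         name = _header_of(lines[i])
--         tail = lines[i].split(':', 1)
--         parts = [tail[1].strip()] if len(tail) > 1 and tail[1].strip() else []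
--         j = i + 1
--         while j < n and _header_of(lines[j]) is None:
--             j += 1
--         parts += lines[i + 1:j]
--         if parts:
--             sections[name] = '\n'.join(parts).strip()
--         i = j
--     if not any(sections.values()):
--         sections['subjective'] = content
--     return sections
-- ===== Notes on version B (the rewrite author's own statement) =====
-- stated objective: alternative
-- what changed: Replaces A's per-line state machine (current_section/section_content accumulators flushed on each header) with span-based grouping: skip the prologue, then each header line owns the raw lines up to the next header, written into the dict directly when non-empty.
import Mathlib
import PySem

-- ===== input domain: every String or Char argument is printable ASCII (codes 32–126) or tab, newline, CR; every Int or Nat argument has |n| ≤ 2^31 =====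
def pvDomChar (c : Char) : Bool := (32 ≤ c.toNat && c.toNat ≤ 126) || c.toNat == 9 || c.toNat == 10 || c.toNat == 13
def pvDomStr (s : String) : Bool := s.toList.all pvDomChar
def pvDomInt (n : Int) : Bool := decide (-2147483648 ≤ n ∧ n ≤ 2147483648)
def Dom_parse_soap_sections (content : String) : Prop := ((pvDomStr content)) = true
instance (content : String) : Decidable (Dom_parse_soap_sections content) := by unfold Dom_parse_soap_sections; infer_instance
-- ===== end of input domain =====

-- B replaces A's per-line state machine (current_section / section_content accumulators with a
-- flush-on-header step) by span-based grouping: skip the prologue, then each header owns the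
-- lines up to the next header (objective: alternative decomposition, same cost).

-- shared helper: the header-recognition loop (textually identical in A's and B's Python)
def pvHeaders : List (String × List String) :=
  [("subjective", ["subjective:", "s:"]),
   ("objective", ["objective:", "o:"]),
   ("assessment", ["assessment:", "a:"]),
   ("plan", ["plan:", "p:"])]

def pvHdr (line : String) : Option String :=
  let lineLower := PySem.Str.strip (PySem.Str.lower line)
  (pvHeaders.find? (fun p => p.2.any (fun h => PySem.Str.startswith lineLower h))).map (·.1)

-- shared helper: content after the header on the same line (identical code in A's and B's Python)
def pvInline (line : String) : List String :=
  let ht := (PySem.Str.splitMax? line ":" 1).getD []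
  if 1 < ht.length ∧ PySem.Str.strip (ht.getD 1 "") ≠ "" then
    [PySem.Str.strip (ht.getD 1 "")]
  else []

def pvInit : PySem.Dict String String :=
  PySem.Dict.ofList [("subjective", ""), ("objective", ""), ("assessment", ""), ("plan", "")]

-- ===== PORT A =====
def pvStepA (st : PySem.Dict String String × Option String × List String) (line : String) :
    PySem.Dict String String × Option String × List String :=
  match pvHdr line with
  | some ns =>
      let d := match st.2.1 with
        | some c =>
            if st.2.2 ≠ [] then st.1.insert c (PySem.Str.strip (PySem.Str.join "\n" st.2.2))
            else st.1
        | none => st.1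
      (d, some ns, pvInline line)
  | none =>
      match st.2.1 with
      | some _ => (st.1, st.2.1, st.2.2 ++ [line])
      | none => st

def pvFlush (st : PySem.Dict String String × Option String × List String) :
    PySem.Dict String String :=
  match st.2.1 with
  | some c =>
      if st.2.2 ≠ [] then st.1.insert c (PySem.Str.strip (PySem.Str.join "\n" st.2.2))
      else st.1
  | none => st.1

def parse_soap_sections (content : String) : List (String × String) :=
  let lines := (PySem.Str.split? content "\n").getD []
  let st := lines.foldl pvStepA (pvInit, none, [])
  let d := pvFlush st
  let d := if d.values.all (fun v => v == "") then d.insert "subjective" content else d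
  d.items

-- ===== PORT B =====
def pvGoB (d : PySem.Dict String String) (name line : String) (rest : List String) :
    PySem.Dict String String :=
  let parts := pvInline line ++ rest.takeWhile (fun l => (pvHdr l).isNone)
  let d' := if parts ≠ [] then d.insert name (PySem.Str.strip (PySem.Str.join "\n" parts)) else d
  match h : rest.dropWhile (fun l => (pvHdr l).isNone) with
  | [] => d'
  -- the head of dropWhile is the next header line; .elim's none branch is unreachable
  | l :: ls => (pvHdr l).elim d' (fun nm => pvGoB d' nm l ls)
termination_by rest.length
decreasing_by
  have hle := List.length_dropWhile_le (p := fun l => (pvHdr l).isNone) (l := rest)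
  rw [h] at hle
  simp at hle
  omega

-- skip the prologue lines, then hand the first header to the grouping recursion
def pvPickB (lines : List String) : PySem.Dict String String :=
  match lines.dropWhile (fun l => (pvHdr l).isNone) with
  | [] => pvInit
  | l :: ls => (pvHdr l).elim pvInit (fun nm => pvGoB pvInit nm l ls)

def parse_soap_sections_alt (content : String) : List (String × String) :=
  let lines := (PySem.Str.split? content "\n").getD []
  let d := pvPickB lines
  let d := if d.values.all (fun v => v == "") then d.insert "subjective" content else d
  d.items

-- ===== PRECONDITION & SPEC =====
def Spec_parse_soap_sections (content : String) (out : List (String × String)) : Prop := out = parse_soap_sections_alt content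
instance (content : String) (out : List (String × String)) : Decidable (Spec_parse_soap_sections content out) := by unfold Spec_parse_soap_sections; infer_instance

-- ===== CLAIM (what is proved, stated in full; the proofs are below) =====
def Claim_equal_parse_soap_sections : Prop := ∀ (content : String), Dom_parse_soap_sections content → Spec_parse_soap_sections content (parse_soap_sections content)

-- ===== LEMMAS AND PROOFS =====

-- A's loop leaves the state unchanged over non-header lines while no section is open
lemma pvFoldA_skip (ls : List String) (d : PySem.Dict String String)
    (h : ∀ l ∈ ls, pvHdr l = none) :
    ls.foldl pvStepA (d, none, []) = (d, none, ([] : List String)) := by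
  induction ls with
  | nil => rfl
  | cons x xs ih =>
      have hx : pvHdr x = none := h x (by simp)
      simp only [List.foldl_cons, pvStepA, hx]
      exact ih (fun l hl => h l (by simp [hl]))

-- A's loop only appends non-header lines to the buffer while a section is open
lemma pvFoldA_body (ls : List String) (d : PySem.Dict String String) (c : String)
    (buf : List String) (h : ∀ l ∈ ls, pvHdr l = none) :
    ls.foldl pvStepA (d, some c, buf) = (d, some c, buf ++ ls) := by
  induction ls generalizing buf with
  | nil => simp
  | cons x xs ih =>
      have hx : pvHdr x = none := h x (by simp)
      simp only [List.foldl_cons, pvStepA, hx]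
      rw [ih (buf ++ [x]) (fun l hl => h l (by simp [hl]))]
      simp

-- the head of dropWhile fails the predicate
lemma pvDropHead {α : Type} (p : α → Bool) :
    ∀ (rest : List α) (l : α) (ls : List α), rest.dropWhile p = l :: ls → p l = false := by
  intro rest
  induction rest with
  | nil => intro l ls h; simp [List.dropWhile] at h
  | cons x xs ih =>
      intro l ls h
      by_cases hx : p x = true
      · rw [List.dropWhile_cons_of_pos hx] at h; exact ih l ls h
      · rw [List.dropWhile_cons_of_neg hx] at h
        cases h; simpa using hx

-- unfolding pvGoB when no further header follows
lemma pvGoB_nil (d : PySem.Dict String String) (name line : String) (rest : List String)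
    (hdrop : rest.dropWhile (fun l => (pvHdr l).isNone) = []) :
    pvGoB d name line rest =
      (if pvInline line ++ rest.takeWhile (fun l => (pvHdr l).isNone) ≠ [] then
        d.insert name (PySem.Str.strip (PySem.Str.join "\n"
          (pvInline line ++ rest.takeWhile (fun l => (pvHdr l).isNone))))
      else d) := by
  rw [pvGoB]
  split
  · rfl
  · next l ls heq => cases hdrop.symm.trans heq

-- unfolding pvGoB when the next header line is l
lemma pvGoB_cons (d d2 X : PySem.Dict String String) (name line : String) (rest : List String)
    (l : String) (ls : List String) (nm : String)
    (hdrop : rest.dropWhile (fun l => (pvHdr l).isNone) = l :: ls)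
    (hnm : pvHdr l = some nm)
    (hd2 : d2 = (if pvInline line ++ rest.takeWhile (fun l => (pvHdr l).isNone) ≠ [] then
        d.insert name (PySem.Str.strip (PySem.Str.join "\n"
          (pvInline line ++ rest.takeWhile (fun l => (pvHdr l).isNone))))
      else d))
    (hX : pvGoB d2 nm l ls = X) :
    pvGoB d name line rest = X := by
  conv_lhs => rw [pvGoB]
  split
  · next heq => cases heq.symm.trans hdrop
  · next l' ls' heq =>
      cases hdrop.symm.trans heq
      rw [hnm, ← hd2]
      exact hX

-- main correspondence: A's fold-then-flush from an open section equals B's span recursion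
lemma pvMain (n : Nat) : ∀ (rest : List String), rest.length ≤ n →
    ∀ (d : PySem.Dict String String) (name line : String), pvHdr line = some name →
    pvFlush (rest.foldl pvStepA (d, some name, pvInline line)) = pvGoB d name line rest := by
  induction n with
  | zero =>
      intro rest hlen d name line hline
      have : rest = [] := List.length_eq_zero_iff.mp (Nat.le_zero.mp hlen)
      subst this
      rw [pvGoB_nil d name line [] rfl]
      simp [pvFlush]
  | succ n ih =>
      intro rest hlen d name line hline
      have hsplit := List.takeWhile_append_dropWhile
        (p := fun l => (pvHdr l).isNone) (l := rest)
      have htake : ∀ l ∈ rest.takeWhile (fun l => (pvHdr l).isNone), pvHdr l = none := by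
        intro l hl
        have := List.mem_takeWhile_imp hl
        simpa [Option.isNone_iff_eq_none] using this
      conv_lhs => rw [← hsplit]
      rw [List.foldl_append]
      rw [pvFoldA_body _ _ _ _ htake]
      cases hdrop : rest.dropWhile (fun l => (pvHdr l).isNone) with
      | nil =>
          rw [pvGoB_nil d name line rest hdrop]
          simp only [List.foldl_nil, pvFlush]
      | cons l ls =>
          have hfalse := pvDropHead (fun l => (pvHdr l).isNone) rest l ls hdrop
          have hl : pvHdr l ≠ none := by
            intro hno; simp [hno] at hfalse
          obtain ⟨nm, hnm⟩ := Option.ne_none_iff_exists'.mp hl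
          have hlenls : ls.length ≤ n := by
            have := congrArg List.length hsplit
            rw [hdrop] at this
            simp at this
            omega
          simp only [List.foldl_cons, pvStepA, hnm]
          rw [ih ls hlenls _ nm l hnm]
          exact (pvGoB_cons d _ _ name line rest l ls nm hdrop hnm rfl rfl).symm

-- the whole pipeline before the fallback: A's fold-then-flush equals B's skip-then-group
lemma pvLines (lines : List String) :
    pvFlush (lines.foldl pvStepA (pvInit, none, [])) = pvPickB lines := by
  have hsplit := List.takeWhile_append_dropWhile
    (p := fun l => (pvHdr l).isNone) (l := lines)
  have htake : ∀ l ∈ lines.takeWhile (fun l => (pvHdr l).isNone), pvHdr l = none := by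
    intro l hl
    have := List.mem_takeWhile_imp hl
    simpa [Option.isNone_iff_eq_none] using this
  unfold pvPickB
  conv_lhs => rw [← hsplit]
  rw [List.foldl_append, pvFoldA_skip _ _ htake]
  cases hdrop : lines.dropWhile (fun l => (pvHdr l).isNone) with
  | nil => simp [pvFlush]
  | cons l ls =>
      have hfalse := pvDropHead (fun l => (pvHdr l).isNone) lines l ls hdrop
      have hl : pvHdr l ≠ none := by
        intro hno; simp [hno] at hfalse
      obtain ⟨nm, hnm⟩ := Option.ne_none_iff_exists'.mp hl
      simp only [List.foldl_cons, pvStepA, hnm]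
      rw [pvMain ls.length ls le_rfl _ nm l hnm]
      simp

-- ===== VERDICT (by name: the statement is the Claim_ definition above) =====
theorem parse_soap_sections_spec : Claim_equal_parse_soap_sections := by
  intro content _
  unfold Spec_parse_soap_sections
  simp only [parse_soap_sections, parse_soap_sections_alt, pvLines]
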